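-- pv_equiv track=rewrite | github.com/abao1999/tsfm-lens | hf_demo/app.py | summarize_heads
-- ===== SOURCE A (Python) =====
-- def summarize_heads(heads_to_ablate: list[tuple[int, int]]) -> str:
--     if not heads_to_ablate:
--         return "None"
--     grouped: dict[int, list[int]] = {}
--     for layer_idx, head_idx in heads_to_ablate:
--         grouped.setdefault(layer_idx, []).append(head_idx)
--     parts = [f"L{layer_idx}: {grouped[layer_idx]}" for layer_idx in sorted(grouped)]
--     return "; ".join(parts)
-- ===== SOURCE B (Python) =====
-- def summarize_heads(heads_to_ablate: list[tuple[int, int]]) -> str: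
--     s = sorted(heads_to_ablate, key=lambda h: h[0])
--     if not s:
--         return "None"
--     parts = []
--     cur_layer = s[0][0]
--     cur_heads = []
--     for layer, head in s:
--         if layer != cur_layer:
--             parts.append(f"L{cur_layer}: {cur_heads}")
--             cur_layer = layer
--             cur_heads = [head]
--         else:
--             cur_heads.append(head)
--     parts.append(f"L{cur_layer}: {cur_heads}")
--     return "; ".join(parts)
-- ===== Notes on version B (the rewrite author's own statement) =====
-- stated objective: idiomatic
-- what changed: B replaces A's dict-based grouping followed by a sort of the keys with a single stable sort of the pairs by layer and one linear groupby-style pass that emits each layer's part directly.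
import Mathlib
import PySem

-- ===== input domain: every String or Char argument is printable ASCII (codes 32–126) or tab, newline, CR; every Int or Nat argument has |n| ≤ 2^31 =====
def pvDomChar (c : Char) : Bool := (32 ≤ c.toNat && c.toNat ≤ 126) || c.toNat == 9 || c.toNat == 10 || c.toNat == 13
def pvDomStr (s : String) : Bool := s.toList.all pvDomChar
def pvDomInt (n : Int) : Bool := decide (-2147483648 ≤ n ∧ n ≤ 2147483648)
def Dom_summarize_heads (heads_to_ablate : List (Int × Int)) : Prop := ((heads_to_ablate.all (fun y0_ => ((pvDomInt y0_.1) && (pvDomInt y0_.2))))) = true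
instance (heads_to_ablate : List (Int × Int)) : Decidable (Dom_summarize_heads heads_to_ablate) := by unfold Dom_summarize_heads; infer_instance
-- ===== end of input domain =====

-- B replaces A's dict-grouping-then-key-sort by one stable sort by layer followed by a
-- single groupby-style pass (objective: idiomatic/alternative; same result proved equal).

-- f"L{layer}: {heads}" with Python's list repr of ints (shared formatting helper)
def pvPart (layer : Int) (hs : List Int) : String :=
  "L" ++ PySem.Int.toStr layer ++ ": [" ++ PySem.Str.join ", " (hs.map PySem.Int.toStr) ++ "]"

-- ===== PORT A =====
def summarize_heads (heads_to_ablate : List (Int × Int)) : String :=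
  if heads_to_ablate = [] then "None"
  else
    -- grouped.setdefault(layer, []).append(head)  ==  grouped[layer] = grouped.get(layer, []) + [head]
    let grouped : PySem.Dict Int (List Int) :=
      heads_to_ablate.foldl (fun d p => d.modify p.1 [] (fun v => v ++ [p.2])) PySem.Dict.empty
    let parts := (PySem.List.sorted grouped.keys (fun k => k)).map
      (fun k => pvPart k (grouped.getD k []))
    PySem.Str.join "; " parts

-- ===== PORT B =====
-- the explicit accumulator loop of Source B: state = (parts, cur_layer, cur_heads)
def pvBLoop : List String × Int × List Int → List (Int × Int) → List String × Int × List Int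
  | st, [] => st
  | (parts, c, hs), (k, h) :: t =>
      if k ≠ c then pvBLoop (parts ++ [pvPart c hs], k, [h]) t
      else pvBLoop (parts, c, hs ++ [h]) t

def summarize_heads_alt (heads_to_ablate : List (Int × Int)) : String :=
  match PySem.List.sorted heads_to_ablate (fun h => h.1) with
  | [] => "None"
  | (l0, h0) :: t =>
    let fin := pvBLoop ([], l0, []) ((l0, h0) :: t)
    PySem.Str.join "; " (fin.1 ++ [pvPart fin.2.1 fin.2.2])

-- ===== PRECONDITION & SPEC =====
def Spec_summarize_heads (heads_to_ablate : List (Int × Int)) (out : String) : Prop := out = summarize_heads_alt heads_to_ablate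
instance (heads_to_ablate : List (Int × Int)) (out : String) : Decidable (Spec_summarize_heads heads_to_ablate out) := by unfold Spec_summarize_heads; infer_instance

-- ===== CLAIM (what is proved, stated in full; the proofs are below) =====
def Claim_equal_summarize_heads : Prop := ∀ (heads_to_ablate : List (Int × Int)), Dom_summarize_heads heads_to_ablate → Spec_summarize_heads heads_to_ablate (summarize_heads heads_to_ablate)

-- ===== LEMMAS AND PROOFS =====

-- groups of a key-sorted list, as recursion mirroring pvBLoop but emitting parts directly
def pvG : Int → List Int → List (Int × Int) → List String
  | c, hs, [] => [pvPart c hs]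
  | c, hs, (k, h) :: t => if k ≠ c then pvPart c hs :: pvG k [h] t else pvG c (hs ++ [h]) t

-- canonical form: distinct keys in order of first appearance, each with all its heads
def pvGmap (s : List (Int × Int)) : List String :=
  (PySem.List.dedup (s.map Prod.fst)).map
    (fun k => pvPart k ((s.filter (fun p => p.1 == k)).map Prod.snd))

theorem pvBLoop_G (s : List (Int × Int)) : ∀ parts c hs,
    (pvBLoop (parts, c, hs) s).1 ++ [pvPart (pvBLoop (parts, c, hs) s).2.1 (pvBLoop (parts, c, hs) s).2.2]
      = parts ++ pvG c hs s := by
  induction s with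
  | nil => intro parts c hs; simp [pvBLoop, pvG]
  | cons p t ih =>
      intro parts c hs
      obtain ⟨k, h⟩ := p
      by_cases hk : k ≠ c
      · simp [pvBLoop, pvG, hk, ih]
      · simp [pvBLoop, pvG, hk, ih]

theorem pv_foldl_add_mem (x : Int) : ∀ (xs s : List Int), x ∈ s →
    xs.foldl PySem.Set.add s = (xs.filter (fun y => y != x)).foldl PySem.Set.add s := by
  intro xs
  induction xs with
  | nil => intro s _; rfl
  | cons y t ih =>
      intro s hx
      by_cases hy : y = x
      · subst hy
        have hc : PySem.Set.add s y = s := by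
          simp [PySem.Set.add, PySem.Set.contains, hx]
        simp [hc, ih s hx]
      · have hx' : x ∈ PySem.Set.add s y := by
          simp [PySem.Set.add]; split <;> simp [hx]
        simp [hy, List.foldl_cons, ih _ hx']

theorem pv_foldl_add_cons (x : Int) : ∀ (ys s : List Int), x ∉ ys →
    ys.foldl PySem.Set.add (x :: s) = x :: ys.foldl PySem.Set.add s := by
  intro ys
  induction ys with
  | nil => intro s _; rfl
  | cons y t ih =>
      intro s hx
      have hyx : ¬ (y = x) := fun h => hx (h ▸ List.mem_cons_self)
      have hstep : PySem.Set.add (x :: s) y = x :: PySem.Set.add s y := by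
        by_cases hm : y ∈ s
        · have h1 : PySem.Set.add (x :: s) y = x :: s := by
            simp [PySem.Set.add, PySem.Set.contains, hm]
          have h2 : PySem.Set.add s y = s := by
            simp [PySem.Set.add, PySem.Set.contains, hm]
          rw [h1, h2]
        · have h1 : PySem.Set.add (x :: s) y = (x :: s) ++ [y] := by
            simp [PySem.Set.add, PySem.Set.contains, hm, hyx]
          have h2 : PySem.Set.add s y = s ++ [y] := by
            simp [PySem.Set.add, PySem.Set.contains, hm]
          rw [h1, h2]; rfl
      have hx' : x ∉ t := fun h => hx (List.mem_cons_of_mem _ h)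
      simp [List.foldl_cons, hstep, ih _ hx']

theorem pv_dedup_cons (x : Int) (xs : List Int) :
    PySem.List.dedup (x :: xs) = x :: PySem.List.dedup (xs.filter (fun y => y != x)) := by
  have h1 : PySem.List.dedup (x :: xs) = xs.foldl PySem.Set.add [x] := by
    simp [PySem.List.dedup_eq_ofList, PySem.Set.ofList_eq_foldl, PySem.Set.add, PySem.Set.contains]
  have h2 := pv_foldl_add_mem x xs [x] (by simp)
  have h3 : (xs.filter (fun y => y != x)).foldl PySem.Set.add [x]
      = x :: (xs.filter (fun y => y != x)).foldl PySem.Set.add [] := by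
    apply pv_foldl_add_cons
    simp
  simp [h2, h3, PySem.List.dedup_eq_ofList, PySem.Set.ofList_eq_foldl]

theorem pv_foldl_add_sublist : ∀ (xs acc : List Int), List.Sublist (xs.foldl PySem.Set.add acc) (acc ++ xs) := by
  intro xs
  induction xs with
  | nil => intro acc; simp
  | cons y t ih =>
      intro acc
      have hrec := ih (PySem.Set.add acc y)
      refine List.Sublist.trans hrec ?_
      by_cases h : PySem.Set.contains acc y = true
      · have hadd : PySem.Set.add acc y = acc := by unfold PySem.Set.add; rw [if_pos h]
        rw [hadd]
        exact List.Sublist.append_left (List.sublist_cons_self _ _) acc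
      · have hadd : PySem.Set.add acc y = acc ++ [y] := by unfold PySem.Set.add; rw [if_neg h]
        rw [hadd, List.append_assoc]
        exact List.Sublist.refl _

theorem pv_dedup_sublist (xs : List Int) : List.Sublist (PySem.List.dedup xs) xs := by
  have := pv_foldl_add_sublist xs []
  simpa [PySem.List.dedup_eq_ofList, PySem.Set.ofList_eq_foldl] using this

theorem pv_dedup_pairwise_lt (xs : List Int) (h : xs.Pairwise (· ≤ ·)) :
    (PySem.List.dedup xs).Pairwise (· < ·) := by
  have hle : (PySem.List.dedup xs).Pairwise (· ≤ ·) := List.Pairwise.sublist (pv_dedup_sublist xs) h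
  have hnd : (PySem.List.dedup xs).Nodup := by
    rw [PySem.List.dedup_eq_ofList]; exact PySem.Set.nodup_ofList _
  exact (hle.and hnd).imp (fun {a b} hab => lt_of_le_of_ne hab.1 hab.2)

theorem pv_pairwise_insertBy (x : Int × Int) : ∀ (ys : List (Int × Int)),
    ys.Pairwise (fun a b => a.1 ≤ b.1) →
    (PySem.List.insertBy (fun a b => decide (a.1 < b.1)) x ys).Pairwise (fun a b => a.1 ≤ b.1) := by
  intro ys
  induction ys with
  | nil => intro _; exact List.pairwise_singleton _ _
  | cons y t ih =>
      intro hp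
      rw [List.pairwise_cons] at hp
      by_cases hlt : x.1 < y.1
      · rw [show PySem.List.insertBy (fun a b => decide (a.1 < b.1)) x (y :: t) = x :: y :: t by
          simp [PySem.List.insertBy, hlt]]
        refine List.pairwise_cons.mpr ⟨?_, List.pairwise_cons.mpr hp⟩
        intro z hz
        rcases List.mem_cons.mp hz with h | h
        · exact le_of_lt (h ▸ hlt)
        · exact le_trans (le_of_lt hlt) (hp.1 z h)
      · rw [show PySem.List.insertBy (fun a b => decide (a.1 < b.1)) x (y :: t)
            = y :: PySem.List.insertBy (fun a b => decide (a.1 < b.1)) x t by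
          simp [PySem.List.insertBy, hlt]]
        refine List.pairwise_cons.mpr ⟨?_, ih hp.2⟩
        intro z hz
        rcases (PySem.List.mem_insertBy _ _ _ _).mp hz with h | h
        · exact h ▸ le_of_not_gt hlt
        · exact hp.1 z h

theorem pv_filter_insertBy (k : Int) (x : Int × Int) : ∀ (ys : List (Int × Int)),
    ys.Pairwise (fun a b => a.1 ≤ b.1) →
    (PySem.List.insertBy (fun a b => decide (a.1 < b.1)) x ys).filter (fun p => p.1 == k)
      = if x.1 == k then ys.filter (fun p => p.1 == k) ++ [x] else ys.filter (fun p => p.1 == k) := by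
  intro ys
  induction ys with
  | nil =>
      intro _
      show List.filter (fun p => p.1 == k) [x] = _
      by_cases hxk : x.1 = k <;> simp [hxk]
  | cons y t ih =>
      intro hp
      rw [List.pairwise_cons] at hp
      by_cases hlt : x.1 < y.1
      · rw [show PySem.List.insertBy (fun a b => decide (a.1 < b.1)) x (y :: t) = x :: y :: t by
          simp [PySem.List.insertBy, hlt]]
        by_cases hxk : x.1 = k
        · -- all of y :: t has keys > k, so its filter is empty
          have hy : ¬ (y.1 = k) := by omega
          have ht : (t.filter (fun p => p.1 == k)) = [] := by
            rw [List.filter_eq_nil_iff]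
            intro p hpt
            have := hp.1 p hpt
            simp only [beq_iff_eq]
            omega
          have hyb : (y.1 == k) = false := by simpa using hy
          have hxb : (x.1 == k) = true := by simpa using hxk
          simp [hxb, hyb, ht]
        · have hxb : (x.1 == k) = false := by simpa using hxk
          simp [List.filter_cons, hxb]
      · rw [show PySem.List.insertBy (fun a b => decide (a.1 < b.1)) x (y :: t)
            = y :: PySem.List.insertBy (fun a b => decide (a.1 < b.1)) x t by
          simp [PySem.List.insertBy, hlt]]
        rw [List.filter_cons, List.filter_cons, ih hp.2]
        by_cases hxk : x.1 = k <;> by_cases hyk : y.1 = k <;> simp [hxk, hyk]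

theorem pv_stab_fold (k : Int) : ∀ (l : List (Int × Int)) (acc : List (Int × Int)),
    acc.Pairwise (fun a b => a.1 ≤ b.1) →
    ((l.foldl (fun acc x => PySem.List.insertBy (fun a b => decide (a.1 < b.1)) x acc) acc).filter
        (fun p => p.1 == k))
      = acc.filter (fun p => p.1 == k) ++ l.filter (fun p => p.1 == k) := by
  intro l
  induction l with
  | nil => intro acc _; simp
  | cons x t ih =>
      intro acc hp
      have h1 := ih (PySem.List.insertBy (fun a b => decide (a.1 < b.1)) x acc) (pv_pairwise_insertBy x acc hp)
      rw [List.foldl_cons, h1, pv_filter_insertBy k x acc hp]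
      by_cases hxk : x.1 = k
      · simp [hxk]
      · simp [hxk]

-- stability of Python's sort: the elements with key k keep their original order
theorem pv_sorted_filter (l : List (Int × Int)) (k : Int) :
    (PySem.List.sorted l (fun h => h.1)).filter (fun p => p.1 == k)
      = l.filter (fun p => p.1 == k) := by
  rw [PySem.List.sorted_eq_foldl_insertBy]
  simpa using pv_stab_fold k l [] (by simp)

theorem pv_gmap_cons (k : Int) (h : Int) (t : List (Int × Int)) :
    pvGmap ((k, h) :: t)
      = pvPart k (h :: (t.filter (fun p => p.1 == k)).map Prod.snd)
        :: pvGmap (t.filter (fun p => p.1 != k)) := by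
  unfold pvGmap
  rw [List.map_cons, pv_dedup_cons]
  have hmf : (t.map Prod.fst).filter (fun y => y != k) = (t.filter (fun p => p.1 != k)).map Prod.fst := by
    rw [List.filter_map]
    rfl
  rw [hmf]
  rw [List.map_cons]
  congr 1
  · simp
  · apply List.map_congr_left
    intro a ha
    have hak : a ≠ k := by
      have : a ∈ (t.filter (fun p => p.1 != k)).map Prod.fst := by
        have hs := pv_dedup_sublist ((t.filter (fun p => p.1 != k)).map Prod.fst)
        exact hs.mem ha
      obtain ⟨p, hpmem, hpa⟩ := List.mem_map.mp this
      have := List.of_mem_filter hpmem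
      simp only [bne_iff_ne, ne_eq] at this
      omega
    congr 1
    rw [List.filter_filter]
    have : ((k, h) :: t).filter (fun p => p.1 == a) = t.filter (fun p => p.1 == a) := by
      simp [Ne.symm hak]
    rw [this]
    congr 1
    apply List.filter_congr
    intro p _
    by_cases hpa : p.1 = a
    · simp [hpa, hak]
    · simp [hpa]

theorem pv_Gspec : ∀ (s : List (Int × Int)), s.Pairwise (fun a b => a.1 ≤ b.1) →
    ∀ (c : Int) (hs : List Int), (∀ p ∈ s, c ≤ p.1) →
    pvG c hs s = pvPart c (hs ++ (s.filter (fun p => p.1 == c)).map Prod.snd)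
      :: pvGmap (s.filter (fun p => p.1 != c)) := by
  intro s
  induction s with
  | nil => intro _ c hs _; simp [pvG, pvGmap, PySem.List.dedup_eq_ofList, PySem.Set.ofList]
  | cons p t ih =>
      intro hp c hs hb
      obtain ⟨k, h⟩ := p
      rw [List.pairwise_cons] at hp
      by_cases hkc : k = c
      · subst hkc
        have h1 := ih hp.2 k (hs ++ [h]) hp.1
        simp only [pvG, ne_eq, not_true_eq_false, ite_false]
        rw [h1]
        congr 1
        · congr 1
          simp
        · congr 1
          simp
      · have hck : c < k := lt_of_le_of_ne (hb (k, h) List.mem_cons_self) (by simpa using Ne.symm hkc)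
        simp only [pvG, ne_eq, hkc, not_false_eq_true, ite_true]
        have h1 := ih hp.2 k [h] (fun p hpt => hp.1 p hpt)
        rw [h1]
        have htc : ∀ p ∈ t, ¬ (p.1 = c) := by
          intro p hpt
          have := hp.1 p hpt
          omega
        have hfileq : t.filter (fun p => p.1 == c) = [] := by
          rw [List.filter_eq_nil_iff]; intro p hpt; simpa using htc p hpt
        have hfilne : t.filter (fun p => p.1 != c) = t := by
          rw [List.filter_eq_self]; intro p hpt; simpa using htc p hpt
        have hcons : ((k, h) :: t).filter (fun p => p.1 == c) = [] := by
          simp [hkc, hfileq]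
        have hcons' : ((k, h) :: t).filter (fun p => p.1 != c) = (k, h) :: t := by
          simp [hkc, hfilne]
        rw [hcons, hcons']
        rw [pv_gmap_cons k h t]
        simp

-- B equals the canonical form on nonempty input
theorem pv_B_eq (l : List (Int × Int)) (hl : l ≠ []) :
    summarize_heads_alt l = PySem.Str.join "; " (pvGmap (PySem.List.sorted l (fun h => h.1))) := by
  unfold summarize_heads_alt
  rcases hs : PySem.List.sorted l (fun h => h.1) with _ | ⟨⟨l0, h0⟩, t⟩
  · have hperm := PySem.List.sorted_perm l (fun h => h.1) false
    rw [hs] at hperm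
    exact absurd (List.nil_perm.mp hperm) hl
  · simp only
    rw [pvBLoop_G]
    have hpw : ((l0, h0) :: t).Pairwise (fun a b : Int × Int => a.1 ≤ b.1) := by
      rw [← hs]; exact PySem.List.sorted_pairwise l (fun h => h.1)
    have hb : ∀ p ∈ (l0, h0) :: t, l0 ≤ p.1 := by
      intro p hp
      rcases List.mem_cons.mp hp with h | h
      · exact le_of_eq (by rw [h])
      · exact (List.pairwise_cons.mp hpw).1 p h
    rw [pv_Gspec _ hpw l0 [] hb]
    rw [pv_gmap_cons l0 h0 t]
    have e1 : ((l0, h0) :: t).filter (fun p => p.1 == l0) = (l0, h0) :: t.filter (fun p => p.1 == l0) := by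
      simp
    have e2 : ((l0, h0) :: t).filter (fun p => p.1 != l0) = t.filter (fun p => p.1 != l0) := by
      simp
    rw [e1, e2]
    simp

-- A equals the canonical form on nonempty input
theorem pv_A_eq (l : List (Int × Int)) (hl : l ≠ []) :
    summarize_heads l = PySem.Str.join "; " (pvGmap (PySem.List.sorted l (fun h => h.1))) := by
  unfold summarize_heads
  rw [if_neg hl]
  simp only
  congr 1
  -- keys of the grouped dict
  have hkeys : (l.foldl (fun d p => d.modify p.1 [] (fun v => v ++ [p.2]))
      (PySem.Dict.empty : PySem.Dict Int (List Int))).keys = PySem.Set.ofList (l.map Prod.fst) := by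
    rw [PySem.Dict.keys_foldl_modify_key l Prod.fst [] (fun _ p v => v ++ [p.2]) PySem.Dict.empty]
    simp [PySem.Dict.empty, PySem.Set.update_nil_left]
  have hget : ∀ k, (l.foldl (fun d p => d.modify p.1 [] (fun v => v ++ [p.2]))
      (PySem.Dict.empty : PySem.Dict Int (List Int))).getD k []
      = (l.filter (fun p => p.1 == k)).map Prod.snd := by
    intro k
    rw [PySem.Dict.getD_foldl_modify_append l PySem.Dict.empty k]
    rfl
  -- sorted keys = dedup of the sorted list's keys
  set s := PySem.List.sorted l (fun h => h.1) with hsdef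
  have hperm : (PySem.List.dedup (s.map Prod.fst)).Perm (PySem.Set.ofList (l.map Prod.fst)) := by
    rw [PySem.List.dedup_eq_ofList]
    have hnd1 := PySem.Set.nodup_ofList (s.map Prod.fst)
    have hnd2 := PySem.Set.nodup_ofList (l.map Prod.fst)
    rw [List.perm_ext_iff_of_nodup hnd1 hnd2]
    intro a
    rw [PySem.Set.mem_ofList, PySem.Set.mem_ofList, List.mem_map, List.mem_map]
    constructor <;> rintro ⟨p, hp, rfl⟩
    · exact ⟨p, (PySem.List.mem_sorted l _ _ p).mp hp, rfl⟩
    · exact ⟨p, (PySem.List.mem_sorted l _ _ p).mpr hp, rfl⟩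
  have hlt : (PySem.List.dedup (s.map Prod.fst)).Pairwise (· < ·) := by
    apply pv_dedup_pairwise_lt
    exact PySem.List.sorted_map_key_pairwise l (fun h => h.1)
  have hsortkeys : PySem.List.sorted (PySem.Set.ofList (l.map Prod.fst)) (fun k => k)
      = PySem.List.dedup (s.map Prod.fst) :=
    PySem.List.sorted_eq_of_perm_of_pairwise_lt _ _ _ hperm hlt
  rw [hkeys, hsortkeys]
  unfold pvGmap
  apply List.map_congr_left
  intro k _
  rw [hget k, hsdef, pv_sorted_filter l k]

-- ===== VERDICT (by name: the statement is the Claim_ definition above) =====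
theorem summarize_heads_spec : Claim_equal_summarize_heads := by
  intro l _
  unfold Spec_summarize_heads
  by_cases hl : l = []
  · subst hl; rfl
  · rw [pv_A_eq l hl, pv_B_eq l hl]
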